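-- pv_equiv track=rewrite | github.com/yosifsayed444/OS-1-Project | gui/gantt_chart.py | convert_srtf
-- ===== SOURCE A (Python) =====
-- def convert_srtf(srtf_output):
--
--     if not srtf_output:
--         return []
--
--     result = []
--     start = srtf_output[0][0]
--     current = srtf_output[0][1]
--
--     for i in range(1, len(srtf_output)):
--         time, pid = srtf_output[i]
--
--         if pid != current:
--             result.append((current, start, time))
--             current = pid
--             start = time
--
--     result.append((current, start, srtf_output[-1][0] + 1))
--
--     return result
-- ===== SOURCE B (Python) =====
-- from itertools import groupby
--
-- def convert_srtf(srtf_output):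
--     if not srtf_output:
--         return []
--     # phase 1: group consecutive entries with equal pid; keep (pid, start time of run)
--     runs = [(pid, next(g)[0]) for pid, g in groupby(srtf_output, key=lambda e: e[1])]
--     # phase 2: each run ends where the next one starts; the last run ends at last time + 1
--     ends = [s for _, s in runs[1:]] + [srtf_output[-1][0] + 1]
--     return [(pid, start, end) for (pid, start), end in zip(runs, ends)]
-- ===== Notes on version B (the rewrite author's own statement) =====
-- stated objective: idiomatic
-- what changed: Replaces A's single stateful streaming pass (mutable current/start accumulator) with an itertools.groupby two-phase structure: first collect consecutive runs as (pid, start), then pair each run with the next run's start (or last time + 1) to form intervals.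
import Mathlib
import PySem

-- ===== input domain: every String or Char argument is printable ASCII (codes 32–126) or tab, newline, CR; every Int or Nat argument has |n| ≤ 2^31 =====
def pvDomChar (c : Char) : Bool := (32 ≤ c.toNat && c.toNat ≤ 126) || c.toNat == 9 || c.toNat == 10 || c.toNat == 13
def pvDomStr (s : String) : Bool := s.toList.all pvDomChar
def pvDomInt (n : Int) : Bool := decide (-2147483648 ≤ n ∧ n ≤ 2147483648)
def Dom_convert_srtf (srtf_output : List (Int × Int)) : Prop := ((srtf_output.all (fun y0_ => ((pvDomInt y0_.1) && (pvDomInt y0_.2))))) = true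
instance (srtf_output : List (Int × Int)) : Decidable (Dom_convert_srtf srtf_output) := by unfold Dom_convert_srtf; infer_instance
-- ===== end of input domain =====

-- B replaces A's single stateful streaming pass by a group-then-finalize two-phase
-- structure (consecutive runs first, then interval ends); objective: more idiomatic.

-- ===== PORT A =====
-- Literal port of A: a fold over the tail carrying (result, current, start);
-- srtf_output[-1][0] is ported as rest.getLastD (t0,p0) (the list is nonempty here, so exact).
def pvStepA (acc : List (Int × Int × Int) × Int × Int) (e : Int × Int) :
    List (Int × Int × Int) × Int × Int :=
  if e.2 != acc.2.1 then (acc.1 ++ [(acc.2.1, acc.2.2, e.1)], e.2, e.1) else acc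

def convert_srtf (srtf_output : List (Int × Int)) : List (Int × Int × Int) :=
  match srtf_output with
  | [] => []
  | (t0, p0) :: rest =>
    let s := rest.foldl pvStepA ([], p0, t0)
    s.1 ++ [(s.2.1, s.2.2, (rest.getLastD (t0, p0)).1 + 1)]

-- ===== PORT B =====
-- groupby on pid, keeping (pid, time of the run's first entry)
def pvRuns : List (Int × Int) → List (Int × Int)
  | [] => []
  | (t, p) :: rest => (p, t) :: pvRuns (rest.dropWhile (fun e => e.2 == p))
termination_by l => l.length
decreasing_by
  simpa using Nat.lt_succ_of_le (List.length_dropWhile_le _ _)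

def convert_srtf_alt (srtf_output : List (Int × Int)) : List (Int × Int × Int) :=
  match srtf_output with
  | [] => []
  | x :: _ =>
    let runs := pvRuns srtf_output
    let ends := (runs.drop 1).map Prod.snd ++ [(srtf_output.getLastD x).1 + 1]
    List.zipWith (fun r e => (r.1, r.2, e)) runs ends

-- ===== PRECONDITION & SPEC =====
def Spec_convert_srtf (srtf_output : List (Int × Int)) (out : List (Int × Int × Int)) : Prop := out = convert_srtf_alt srtf_output
instance (srtf_output : List (Int × Int)) (out : List (Int × Int × Int)) : Decidable (Spec_convert_srtf srtf_output out) := by unfold Spec_convert_srtf; infer_instance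

-- ===== CLAIM (what is proved, stated in full; the proofs are below) =====
def Claim_equal_convert_srtf : Prop := ∀ (srtf_output : List (Int × Int)), Dom_convert_srtf srtf_output → Spec_convert_srtf srtf_output (convert_srtf srtf_output)

-- ===== LEMMAS AND PROOFS =====

-- proof-side recursion equal to A's fold
def pvAGo (cur st lt : Int) : List (Int × Int) → List (Int × Int × Int)
  | [] => [(cur, st, lt + 1)]
  | (t, p) :: r => if p ≠ cur then (cur, st, t) :: pvAGo p t t r else pvAGo cur st t r

-- proof-side form of B's finalize phase
def pvMk (runs : List (Int × Int)) (e : Int) : List (Int × Int × Int) :=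
  List.zipWith (fun r e => (r.1, r.2, e)) runs ((runs.drop 1).map Prod.snd ++ [e])

theorem pvMk_cons (a b : Int × Int) (rs : List (Int × Int)) (e : Int) :
    pvMk (a :: b :: rs) e = (a.1, a.2, b.2) :: pvMk (b :: rs) e := by
  simp [pvMk]

theorem pvRuns_cons (t p : Int) (r : List (Int × Int)) :
    pvRuns ((t, p) :: r) = (p, t) :: pvRuns (r.dropWhile (fun e => e.2 == p)) := by
  rw [pvRuns]

theorem getLastD_fst (l : List (Int × Int)) (a : Int × Int) :
    (l.getLastD a).1 = (l.map Prod.fst).getLastD a.1 := by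
  induction l generalizing a with
  | nil => rfl
  | cons x xs ih => simp only [List.getLastD_cons, List.map_cons, ih]

theorem fold_eq_aGo (rest : List (Int × Int)) (res : List (Int × Int × Int)) (cur st lt : Int) :
    (rest.foldl pvStepA (res, cur, st)).1 ++
      [((rest.foldl pvStepA (res, cur, st)).2.1,
        (rest.foldl pvStepA (res, cur, st)).2.2,
        (rest.map Prod.fst).getLastD lt + 1)] = res ++ pvAGo cur st lt rest := by
  induction rest generalizing res cur st lt with
  | nil => simp [pvAGo]
  | cons x r ih =>
    obtain ⟨t, p⟩ := x
    rw [List.foldl_cons, List.map_cons, List.getLastD_cons]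
    by_cases h : p = cur
    · rw [show pvStepA (res, cur, st) (t, p) = (res, cur, st) by simp [pvStepA, h]]
      rw [ih res cur st t]
      simp [pvAGo, h]
    · rw [show pvStepA (res, cur, st) (t, p) = (res ++ [(cur, st, t)], p, t) by
        simp [pvStepA, h]]
      rw [ih (res ++ [(cur, st, t)]) p t t]
      simp [pvAGo, h]

theorem aGo_eq_mk (rest : List (Int × Int)) (cur st lt : Int) :
    pvAGo cur st lt rest =
      pvMk ((cur, st) :: pvRuns (rest.dropWhile (fun e => e.2 == cur)))
        ((rest.map Prod.fst).getLastD lt + 1) := by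
  induction rest generalizing cur st lt with
  | nil => simp [pvAGo, pvRuns, pvMk]
  | cons x r ih =>
    obtain ⟨t, p⟩ := x
    rw [List.map_cons, List.getLastD_cons]
    by_cases h : p = cur
    · rw [show pvAGo cur st lt ((t, p) :: r) = pvAGo cur st t r by simp [pvAGo, h]]
      rw [show List.dropWhile (fun e => e.2 == cur) ((t, p) :: r)
            = List.dropWhile (fun e => e.2 == cur) r by simp [h]]
      exact ih cur st t
    · rw [show pvAGo cur st lt ((t, p) :: r) = (cur, st, t) :: pvAGo p t t r by
        simp [pvAGo, h]]
      rw [show List.dropWhile (fun e => e.2 == cur) ((t, p) :: r) = (t, p) :: r by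
        simp [h]]
      rw [pvRuns_cons, pvMk_cons, ih p t t]

theorem convert_srtf_eq (xs : List (Int × Int)) : convert_srtf xs = convert_srtf_alt xs := by
  cases xs with
  | nil => rfl
  | cons x rest =>
    obtain ⟨t0, p0⟩ := x
    simp only [convert_srtf, convert_srtf_alt, getLastD_fst, List.getLastD_cons]
    rw [fold_eq_aGo rest [] p0 t0 t0, List.nil_append, aGo_eq_mk, pvRuns_cons]
    rfl

-- ===== VERDICT (by name: the statement is the Claim_ definition above) =====
theorem convert_srtf_spec : Claim_equal_convert_srtf := by
  intro xs _
  show convert_srtf xs = convert_srtf_alt xs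
  exact convert_srtf_eq xs
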